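-- pv_equiv track=rewrite | github.com/ngoduythinh250601/Codelearn | All/checkSort/checkSort.py | checkSort
-- ===== SOURCE A (Python) =====
-- def checkSort(a):
--     s = set()
--     s.add(a[0])
--     for i in range(1, len(a)):
--         if a[i] != a[i - 1]:
--             if a[i] in s:
--                 return False
--             s.add(a[i])
--     return True
-- ===== SOURCE B (Python) =====
-- def checkSort(a):
--     # grouped iff, for every distinct value v, its occurrences fill the whole
--     # span between its first and last position: first + count + first-in-reversed == len(a)
--     rev = a[::-1]
--     n = len(a)
--     return all(a.index(v) + a.count(v) + rev.index(v) == n for v in set(a))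
-- ===== Notes on version B (the rewrite author's own statement) =====
-- stated objective: alternative
-- what changed: B uses a per-value span test: for each distinct value, first index + count + index in the reversed list must equal len(a) (occurrences fill a contiguous span), instead of A's sequential scan with a seen-set that rejects a value re-entering at a run boundary.
import Mathlib
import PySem

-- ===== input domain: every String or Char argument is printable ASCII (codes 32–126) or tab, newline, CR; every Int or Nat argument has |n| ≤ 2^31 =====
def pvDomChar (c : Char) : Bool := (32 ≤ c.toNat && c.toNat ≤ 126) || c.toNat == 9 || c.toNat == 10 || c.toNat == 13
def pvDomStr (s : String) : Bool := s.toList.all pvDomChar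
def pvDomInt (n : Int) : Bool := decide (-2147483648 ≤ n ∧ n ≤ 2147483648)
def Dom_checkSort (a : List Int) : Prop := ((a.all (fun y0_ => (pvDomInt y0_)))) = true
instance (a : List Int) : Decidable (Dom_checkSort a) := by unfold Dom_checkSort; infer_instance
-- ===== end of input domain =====

-- B replaces A's sequential seen-set scan by a per-value span test
-- (first index + count + index in the reversed list = length); objective: alternative algorithm.

-- ===== PORT A =====
def checkSort (a : List Int) : Bool :=
  -- s = set(); s.add of the first element (index 0 is in range under Pre_: a ≠ []);
  -- the for-loop over range(1, len(a)) with early 'return False' is an Option-state fold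
  (((PySem.List.pyRange 1 (a.length : Int) 1).foldl
      (fun st i =>
        match st with
        | none => none
        | some s =>
          if PySem.List.pyGetD a i 0 ≠ PySem.List.pyGetD a (i - 1) 0 then
            if PySem.Set.contains s (PySem.List.pyGetD a i 0) then none
            else some (PySem.Set.add s (PySem.List.pyGetD a i 0))
          else some s)
      (some (PySem.Set.add PySem.Set.empty (PySem.List.pyGetD a 0 0)))).isSome)

-- ===== PORT B =====
def checkSort_alt (a : List Int) : Bool :=
  -- rev = a[::-1]; step -1 is never 0, so slice? never returns none
  let rev : List Int := (PySem.List.slice? a none none (-1)).getD []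
  let n : Int := a.length
  -- all(a.index(v) + a.count(v) + rev.index(v) == n for v in set(a));
  -- v is drawn from set(a), so v ∈ a and .index never raises: index? is always some here
  (PySem.Set.ofList a).all (fun v =>
    ((((PySem.List.index? a v).getD 0 + PySem.List.count a v
        + (PySem.List.index? rev v).getD 0 : Nat)) : Int) == n)

-- ===== PRECONDITION & SPEC =====
-- Pre_ excludes only the empty list, on which A raises IndexError reading its first element
-- (B itself would return True there: an empty list has no non-contiguous value).
def Pre_checkSort (a : List Int) : Prop := a ≠ []
instance (a : List Int) : Decidable (Pre_checkSort a) := by unfold Pre_checkSort; infer_instance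
def pvWitness_checkSort : List Int := ([1, 2, 2, 3])
def Spec_checkSort (a : List Int) (out : Bool) : Prop := out = checkSort_alt a
instance (a : List Int) (out : Bool) : Decidable (Spec_checkSort a out) := by unfold Spec_checkSort; infer_instance

-- ===== CLAIM (what is proved, stated in full; the proofs are below) =====
def Claim_equal_checkSort : Prop := ∀ (a : List Int), Dom_checkSort a → Pre_checkSort a → Spec_checkSort a (checkSort a)

-- ===== LEMMAS AND PROOFS =====

-- run-compression: the values of a, consecutive duplicates removed, head first
def pvCompress (p : Int) : List Int → List Int
  | [] => [p]
  | y :: ys => if y = p then pvCompress p ys else p :: pvCompress y ys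

-- A's loop body as a function of (previous value, current value)
def pvStep (st : Option (PySem.Set Int)) (p y : Int) : Option (PySem.Set Int) :=
  match st with
  | none => none
  | some s =>
    if y ≠ p then (if PySem.Set.contains s y then none else some (PySem.Set.add s y))
    else some s

-- A's loop restated structurally over the suffix, tracking the previous value
def pvTail (p : Int) (st : Option (PySem.Set Int)) : List Int → Option (PySem.Set Int)
  | [] => st
  | y :: ys => pvTail y (pvStep st p y) ys

theorem pvCompress_cons_tail (ys : List Int) (p : Int) :
    pvCompress p ys = p :: (pvCompress p ys).tail := by
  induction ys generalizing p with
  | nil => rfl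
  | cons y ys ih =>
    by_cases h : y = p
    · simpa [pvCompress, h] using ih p
    · simp [pvCompress, h]

theorem pvTail_none (p : Int) (ys : List Int) : pvTail p none ys = none := by
  induction ys generalizing p with
  | nil => rfl
  | cons y ys ih => simpa [pvTail, pvStep] using ih y

theorem pvTail_isSome (ys : List Int) : ∀ (p : Int) (s : PySem.Set Int),
    ((pvTail p (some s) ys).isSome = true ↔
      ((pvCompress p ys).tail.Nodup ∧ ∀ r ∈ (pvCompress p ys).tail, r ∉ s)) := by
  induction ys with
  | nil => intro p s; simp [pvTail, pvCompress]
  | cons y ys ih =>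
    intro p s
    by_cases h : y = p
    · simpa [pvTail, pvStep, h, pvCompress] using ih p s
    · have hcomp : pvCompress p (y :: ys) = p :: pvCompress y ys := by
        simp [pvCompress, h]
      by_cases hm : y ∈ s
      · have hstep : pvTail p (some s) (y :: ys) = none := by
          simp [pvTail, pvStep, h, hm, pvTail_none]
        rw [hstep, hcomp, List.tail_cons]
        simp only [Option.isSome_none, Bool.false_eq_true, false_iff, not_and, not_forall]
        intro _
        exact ⟨y, by rw [pvCompress_cons_tail]; exact List.mem_cons_self, by simpa using hm⟩
      · have hstep : pvTail p (some s) (y :: ys) = pvTail y (some (PySem.Set.add s y)) ys := by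
          simp [pvTail, pvStep, h, hm]
        rw [hstep, ih y (PySem.Set.add s y), hcomp, List.tail_cons,
          pvCompress_cons_tail ys y]
        constructor
        · rintro ⟨hn, hall⟩
          have h1 : ∀ r ∈ (pvCompress y ys).tail, r ∉ s ∧ r ≠ y := by
            intro r hr
            have := hall r hr
            rw [PySem.Set.mem_add] at this
            push Not at this
            exact this
          refine ⟨List.nodup_cons.2 ⟨fun hyt => (h1 y hyt).2 rfl, hn⟩, ?_⟩
          rintro r hr
          rcases List.mem_cons.1 hr with rfl | hr
          · exact hm
          · exact (h1 r hr).1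
        · rintro ⟨hn, hall⟩
          rcases List.nodup_cons.1 hn with ⟨hyt, hn'⟩
          refine ⟨hn', fun r hr => ?_⟩
          rw [PySem.Set.mem_add]
          rintro (hrs | rfl)
          · exact hall r (List.mem_cons_of_mem _ hr) hrs
          · exact hyt hr

-- A's index loop over range(1, len(a)) equals the structural loop pvTail over the suffix
theorem pvFoldA (a : List Int) : ∀ (n k : Nat) (st : Option (PySem.Set Int)),
    a.length = k + 1 + n →
    ((PySem.List.pyRange ((k : Int) + 1) (a.length : Int) 1).foldl
      (fun st i =>
        match st with
        | none => none
        | some s =>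
          if PySem.List.pyGetD a i 0 ≠ PySem.List.pyGetD a (i - 1) 0 then
            if PySem.Set.contains s (PySem.List.pyGetD a i 0) then none
            else some (PySem.Set.add s (PySem.List.pyGetD a i 0))
          else some s) st)
    = pvTail (a.getD k 0) st (a.drop (k + 1)) := by
  intro n
  induction n with
  | zero =>
    intro k st hlen
    rw [PySem.List.pyRange_one_eq_nil (by omega)]
    rw [List.drop_eq_nil_of_le (by omega)]
    rfl
  | succ n ih =>
    intro k st hlen
    rw [PySem.List.pyRange_one_cons (by omega), List.foldl_cons]
    have hk1 : ((k : Int) + 1) = ((k + 1 : Nat) : Int) := by push_cast; ring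
    have hstep :
        (match st with
        | none => none
        | some s =>
          if PySem.List.pyGetD a ((k : Int) + 1) 0 ≠ PySem.List.pyGetD a ((k : Int) + 1 - 1) 0 then
            if PySem.Set.contains s (PySem.List.pyGetD a ((k : Int) + 1) 0) then none
            else some (PySem.Set.add s (PySem.List.pyGetD a ((k : Int) + 1) 0))
          else some s)
        = pvStep st (a.getD k 0) (a.getD (k + 1) 0) := by
      have e1 : PySem.List.pyGetD a ((k : Int) + 1) 0 = a.getD (k + 1) 0 := by
        rw [hk1, PySem.List.pyGetD_natCast]
      have e2 : PySem.List.pyGetD a ((k : Int) + 1 - 1) 0 = a.getD k 0 := by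
        rw [show ((k : Int) + 1 - 1) = ((k : Nat) : Int) by ring, PySem.List.pyGetD_natCast]
      cases st with
      | none => rfl
      | some s => simp only [pvStep, e1, e2]
    rw [hstep, hk1, ih (k + 1) _ (by omega)]
    have hd : a.drop (k + 1) = a.getD (k + 1) 0 :: a.drop (k + 2) := by
      rw [List.drop_eq_getElem_cons (by omega), List.getD_eq_getElem a 0 (by omega)]
    rw [hd]
    rfl

-- A's result on a nonempty list: the run representatives are pairwise distinct
theorem pvA_iff (x : Int) (xs : List Int) :
    checkSort (x :: xs) = true ↔ (pvCompress x xs).Nodup := by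
  have hA : checkSort (x :: xs) = (pvTail x (some [x]) xs).isSome := by
    unfold checkSort
    have hr := pvFoldA (x :: xs) xs.length 0
      (some (PySem.Set.add PySem.Set.empty (PySem.List.pyGetD (x :: xs) 0 0))) (by simp [Nat.add_comm])
    simp only [Nat.cast_zero, zero_add] at hr
    rw [hr]
    simp [PySem.Set.add, PySem.Set.empty, PySem.List.pyGetD_zero_cons]
  rw [hA, pvTail_isSome xs x [x]]
  rw [pvCompress_cons_tail xs x, List.nodup_cons]
  constructor
  · rintro ⟨hn, hall⟩
    exact ⟨fun hx => hall x hx (List.mem_singleton.2 rfl), hn⟩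
  · rintro ⟨hx, hn⟩
    exact ⟨hn, fun r hr hrx => hx (List.mem_singleton.1 hrx ▸ hr)⟩

-- ===== B side: the span test =====

-- first-occurrence index (meaningful when v is in the list)
def pvF : List Int → Int → Nat
  | [], _ => 0
  | c :: t, v => if v = c then 0 else pvF t v + 1

-- B's per-value condition, as a Nat equation
def pvEq (a : List Int) (v : Int) : Prop :=
  pvF a v + a.count v + pvF a.reverse v = a.length

theorem pvF_append_of_mem (l t : List Int) (v : Int) (h : v ∈ l) :
    pvF (l ++ t) v = pvF l v := by
  induction l with
  | nil => cases h
  | cons c l ih =>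
    by_cases hc : v = c
    · simp [pvF, hc]
    · rcases List.mem_cons.1 h with h' | h'
      · exact absurd h' hc
      · simp [pvF, hc, ih h']

theorem pvF_append_of_not_mem (l t : List Int) (v : Int) (h : v ∉ l) :
    pvF (l ++ t) v = l.length + pvF t v := by
  induction l with
  | nil => simp
  | cons c l ih =>
    have hc : v ≠ c := fun e => h (e ▸ List.mem_cons_self)
    have hl : v ∉ l := fun e => h (List.mem_cons_of_mem _ e)
    simp only [List.cons_append, pvF, if_neg hc, ih hl, List.length_cons]
    omega

theorem mem_pvCompress (xs : List Int) : ∀ (x v : Int),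
    v ∈ pvCompress x xs ↔ v = x ∨ v ∈ xs := by
  induction xs with
  | nil => intro x v; simp [pvCompress]
  | cons y ys ih =>
    intro x v
    by_cases h : y = x
    · subst h
      rw [pvCompress, if_pos rfl, ih]
      simp only [List.mem_cons]
      tauto
    · rw [pvCompress, if_neg h]
      simp only [List.mem_cons, ih]

-- the count of v never exceeds the span between its first and last occurrence
theorem pvIneq : ∀ (a : List Int) (v : Int), v ∈ a →
    pvF a v + a.count v + pvF a.reverse v ≤ a.length := by
  intro a
  induction a with
  | nil => intro v h; cases h
  | cons c t ih =>
    intro v hv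
    by_cases hc : v = c
    · subst hc
      have h1 : pvF (v :: t) v = 0 := by simp [pvF]
      have h2 : (v :: t).count v = t.count v + 1 := by simp
      by_cases hm : v ∈ t
      · have h3 : pvF (v :: t).reverse v = pvF t.reverse v := by
          rw [List.reverse_cons, pvF_append_of_mem _ _ _ (List.mem_reverse.2 hm)]
        have := ih v hm
        rw [h1, h2, h3, List.length_cons]
        omega
      · have hc0 : t.count v = 0 := List.count_eq_zero.2 hm
        have h3 : pvF (v :: t).reverse v = t.length := by
          rw [List.reverse_cons,
            pvF_append_of_not_mem _ _ _ (fun h => hm (List.mem_reverse.1 h))]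
          simp [pvF]
        rw [h1, h2, h3, hc0, List.length_cons]
        omega
    · have hvt : v ∈ t := by
        rcases List.mem_cons.1 hv with h' | h'
        · exact absurd h' hc
        · exact h'
      have h1 : pvF (c :: t) v = pvF t v + 1 := by simp [pvF, hc]
      have h2 : (c :: t).count v = t.count v := by simp [Ne.symm hc]
      have h3 : pvF (c :: t).reverse v = pvF t.reverse v := by
        rw [List.reverse_cons, pvF_append_of_mem _ _ _ (List.mem_reverse.2 hvt)]
      have := ih v hvt
      rw [h1, h2, h3, List.length_cons]
      omega

-- adding a fresh head shifts everything by one for values of the tail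
theorem pvEq_cons_of_ne (x v : Int) (xs : List Int) (hv : v ∈ xs) (hne : v ≠ x) :
    pvEq (x :: xs) v ↔ pvEq xs v := by
  unfold pvEq
  have h1 : pvF (x :: xs) v = pvF xs v + 1 := by simp [pvF, hne]
  have h2 : (x :: xs).count v = xs.count v := by simp [Ne.symm hne]
  have h3 : pvF (x :: xs).reverse v = pvF xs.reverse v := by
    rw [List.reverse_cons, pvF_append_of_mem _ _ _ (List.mem_reverse.2 hv)]
  rw [h1, h2, h3, List.length_cons]
  omega

theorem pvEq_cons_self_mem (x : Int) (xs : List Int) (hm : x ∈ xs) :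
    (pvEq (x :: xs) x ↔ (pvF xs x = 0 ∧ pvEq xs x)) := by
  unfold pvEq
  have h1 : pvF (x :: xs) x = 0 := by simp [pvF]
  have h2 : (x :: xs).count x = xs.count x + 1 := by simp
  have h3 : pvF (x :: xs).reverse x = pvF xs.reverse x := by
    rw [List.reverse_cons, pvF_append_of_mem _ _ _ (List.mem_reverse.2 hm)]
  have hle := pvIneq xs x hm
  rw [h1, h2, h3, List.length_cons]
  omega

theorem pvEq_cons_self_not_mem (x : Int) (xs : List Int) (hm : x ∉ xs) :
    pvEq (x :: xs) x := by
  unfold pvEq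
  have h1 : pvF (x :: xs) x = 0 := by simp [pvF]
  have h2 : (x :: xs).count x = xs.count x + 1 := by simp
  have hc0 : xs.count x = 0 := List.count_eq_zero.2 hm
  have h3 : pvF (x :: xs).reverse x = xs.length := by
    rw [List.reverse_cons,
      pvF_append_of_not_mem _ _ _ (fun h => hm (List.mem_reverse.1 h))]
    simp [pvF]
  rw [h1, h2, h3, hc0, List.length_cons]
  omega

-- the core equivalence: runs pairwise distinct ↔ every value passes the span test
theorem pvMain (xs : List Int) : ∀ (x : Int),
    (pvCompress x xs).Nodup ↔ ∀ v ∈ x :: xs, pvEq (x :: xs) v := by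
  induction xs with
  | nil =>
    intro x
    have hx : pvEq [x] x := by
      unfold pvEq
      simp [pvF]
    simp only [pvCompress, List.nodup_singleton, true_iff, List.mem_singleton]
    intro v hv
    exact hv ▸ hx
  | cons y ys ih =>
    intro x
    by_cases h : y = x
    · subst h
      rw [pvCompress, if_pos rfl, ih y]
      have hmem : y ∈ y :: ys := List.mem_cons_self
      constructor
      · intro H v hv
        have hv' : v ∈ y :: ys := by
          rcases List.mem_cons.1 hv with h' | h'
          · exact h' ▸ hmem
          · exact h'
        by_cases hvx : v = y
        · subst hvx
          rw [pvEq_cons_self_mem v (v :: ys) hmem]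
          exact ⟨by simp [pvF], H v hmem⟩
        · rw [pvEq_cons_of_ne y v (y :: ys) hv' hvx]
          exact H v hv'
      · intro H v hv
        by_cases hvx : v = y
        · subst hvx
          have := (pvEq_cons_self_mem v (v :: ys) hmem).1
            (H v (List.mem_cons_of_mem _ hmem))
          exact this.2
        · have hv' : v ∈ ys := by
            rcases List.mem_cons.1 hv with h' | h'
            · exact absurd h' hvx
            · exact h'
          have := H v (List.mem_cons_of_mem _ hv)
          rwa [pvEq_cons_of_ne y v (y :: ys) hv hvx] at this
    · rw [pvCompress, if_neg h, List.nodup_cons, ih y, mem_pvCompress]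
      constructor
      · rintro ⟨hnm, hall⟩
        have hx : x ∉ y :: ys := by
          intro hmem
          rcases List.mem_cons.1 hmem with h' | h'
          · exact hnm (Or.inl h')
          · exact hnm (Or.inr h')
        intro v hv
        rcases List.mem_cons.1 hv with h' | h'
        · exact h' ▸ pvEq_cons_self_not_mem x (y :: ys) hx
        · have hvx : v ≠ x := fun e => hx (e ▸ h')
          rw [pvEq_cons_of_ne x v (y :: ys) h' hvx]
          exact hall v h'
      · intro H
        have hx : x ∉ y :: ys := by
          intro hmem
          have h0 := (pvEq_cons_self_mem x (y :: ys) hmem).1 (H x List.mem_cons_self)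
          have hxy : ¬x = y := fun e => h e.symm
          have : pvF (y :: ys) x = pvF ys x + 1 := by simp [pvF, hxy]
          omega
        refine ⟨fun hor => hx ?_, fun v hv => ?_⟩
        · rcases hor with h' | h'
          · exact h' ▸ List.mem_cons_self
          · exact List.mem_cons_of_mem _ h'
        · have hvx : v ≠ x := fun e => hx (e ▸ hv)
          rw [← pvEq_cons_of_ne x v (y :: ys) hv hvx]
          exact H v (List.mem_cons_of_mem _ hv)

-- B's .index bridge: for a member, index? is the first-occurrence index pvF
theorem index?_eq_pvF (l : List Int) (v : Int) (h : v ∈ l) :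
    PySem.List.index? l v = some (pvF l v) := by
  induction l with
  | nil => cases h
  | cons c t ih =>
    by_cases hc : v = c
    · subst hc
      rw [PySem.List.index?_cons_self]
      simp [pvF]
    · have hvt : v ∈ t := by
        rcases List.mem_cons.1 h with h' | h'
        · exact absurd h' hc
        · exact h'
      have hcv : c ≠ v := fun e => hc e.symm
      rw [PySem.List.index?_cons_of_ne t hcv, ih hvt]
      simp [pvF, hc]

theorem pvB_iff (a : List Int) :
    checkSort_alt a = true ↔ ∀ v ∈ a, pvEq a v := by
  unfold checkSort_alt
  rw [PySem.List.slice?_none_none_neg_one]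
  simp only [Option.getD_some, List.all_eq_true]
  constructor
  · intro H v hv
    have := H v ((PySem.Set.mem_ofList a v).2 hv)
    rw [index?_eq_pvF a v hv, index?_eq_pvF a.reverse v (List.mem_reverse.2 hv),
      PySem.List.count_eq] at this
    simp only [Option.getD_some, beq_iff_eq] at this
    unfold pvEq
    omega
  · intro H v hv
    have hv' : v ∈ a := (PySem.Set.mem_ofList a v).1 hv
    have := H v hv'
    unfold pvEq at this
    rw [index?_eq_pvF a v hv', index?_eq_pvF a.reverse v (List.mem_reverse.2 hv'),
      PySem.List.count_eq]
    simp only [Option.getD_some, beq_iff_eq]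
    omega

-- ===== VERDICT (by name: the statement is the Claim_ definition above) =====
theorem checkSort_spec : Claim_equal_checkSort := by
  intro a _ hpre
  unfold Spec_checkSort
  match a with
  | [] => exact absurd rfl hpre
  | x :: xs =>
    rw [Bool.eq_iff_iff, pvA_iff, pvB_iff, pvMain xs x]
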